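-- pv_equiv track=rewrite | github.com/ishunyu/propninja | propninja/scripts/properties/properties.py | _separator_index
-- ===== SOURCE A (Python) =====
-- def _separator_index(line):
--   seenKey = False
--   for i in range(len(line)):
--     x = line[i]
--     if x in ['=', ':']:
--       if seenKey:
--         return i
--       else:
--         raise Exception(line)
--     elif x in [' ', '\t']:
--       if seenKey:
--         return i
--       else:
--         continue
--     seenKey = True
--
--   return -1
-- ===== SOURCE B (Python) =====
-- def _separator_index(line):
--   j = len(line) - len(line.lstrip(' \t'))
--   if j == len(line):
--     return -1
--   if line[j] in ('=', ':'):
--     raise Exception(line)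
--   for i in range(j + 1, len(line)):
--     if line[i] in ('=', ':', ' ', '\t'):
--       return i
--   return -1
-- ===== Notes on version B (the rewrite author's own statement) =====
-- stated objective: alternative
-- what changed: Replaces the single flagged loop (seenKey state machine) with two phases: skip the leading space/tab prefix via lstrip to find the key start, then search from the next index for the first separator/whitespace character.
import Mathlib
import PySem

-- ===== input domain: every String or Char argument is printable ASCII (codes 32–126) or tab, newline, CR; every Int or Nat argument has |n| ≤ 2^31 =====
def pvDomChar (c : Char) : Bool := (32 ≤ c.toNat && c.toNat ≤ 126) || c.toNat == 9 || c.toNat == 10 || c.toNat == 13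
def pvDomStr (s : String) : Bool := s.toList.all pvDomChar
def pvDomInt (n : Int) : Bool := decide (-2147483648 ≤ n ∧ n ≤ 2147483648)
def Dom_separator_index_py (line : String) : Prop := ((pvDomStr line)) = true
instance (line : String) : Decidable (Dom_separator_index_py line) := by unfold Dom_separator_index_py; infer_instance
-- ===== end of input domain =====

-- B replaces A's seenKey state machine by two phases (skip leading space/tab prefix, then search
-- for the first separator/whitespace after the key start); same O(n) cost, different decomposition.

-- ===== PORT A =====
-- the flagged loop of A; on the `raise Exception(line)` branch (excluded by Pre_) the port returns -1
def pvSepA_go : List Char → Int → Bool → Int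
  | [], _, _ => -1
  | x :: rest, i, seen =>
    if x = '=' ∨ x = ':' then (if seen then i else -1)
    else if x = ' ' ∨ x = '\t' then (if seen then i else pvSepA_go rest (i + 1) seen)
    else pvSepA_go rest (i + 1) true

def separator_index_py (line : String) : Int := pvSepA_go line.toList 0 false

-- ===== PORT B =====
-- phase 2: first index ≥ i holding '=', ':', ' ' or '\t'
def pvSepB_find : List Char → Int → Int
  | [], _ => -1
  | x :: rest, i =>
    if x = '=' ∨ x = ':' ∨ x = ' ' ∨ x = '\t' then i else pvSepB_find rest (i + 1)

-- length of the leading space/tab prefix (j = len(line) - len(line.lstrip(' \t')))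
def pvSepB_strip : List Char → Nat
  | [] => 0
  | x :: rest => if x = ' ' ∨ x = '\t' then pvSepB_strip rest + 1 else 0

-- body after the prefix: `if j == len: return -1`, the raise check on line[j], then phase 2;
-- on B's `raise Exception(line)` branch (excluded by Pre_) the port returns -2
def pvSepB_tail (l : List Char) (k : Int) : Int :=
  match l with
  | [] => -1
  | x :: _tail => if x = '=' ∨ x = ':' then -2 else pvSepB_find (l.drop 1) k

def separator_index_py_alt (line : String) : Int :=
  pvSepB_tail (line.toList.drop (pvSepB_strip line.toList))
    ((pvSepB_strip line.toList : Int) + 1)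

-- ===== PRECONDITION & SPEC =====
-- Pre_ excludes exactly the lines whose first non-space/tab character is '=' or ':',
-- on which both A and B raise Exception(line) and return no value.
def Pre_separator_index_py (line : String) : Prop :=
  (line.toList.dropWhile (fun c => c == ' ' || c == '\t')).head? ≠ some '=' ∧
  (line.toList.dropWhile (fun c => c == ' ' || c == '\t')).head? ≠ some ':'
instance (line : String) : Decidable (Pre_separator_index_py line) := by
  unfold Pre_separator_index_py; infer_instance
def pvWitness_separator_index_py : String := "  key = value"
def Spec_separator_index_py (line : String) (out : Int) : Prop := out = separator_index_py_alt line
instance (line : String) (out : Int) : Decidable (Spec_separator_index_py line out) := by unfold Spec_separator_index_py; infer_instance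

-- ===== CLAIM (what is proved, stated in full; the proofs are below) =====
def Claim_equal_separator_index_py : Prop := ∀ (line : String), Dom_separator_index_py line → Pre_separator_index_py line → Spec_separator_index_py line (separator_index_py line)

-- ===== LEMMAS AND PROOFS =====

-- once the key has been seen, A's loop behaves exactly like B's phase-2 search
theorem pvSepA_go_seen (cs : List Char) : ∀ i : Int, pvSepA_go cs i true = pvSepB_find cs i := by
  induction cs with
  | nil => intro i; rfl
  | cons x rest ih =>
    intro i
    simp only [pvSepA_go, pvSepB_find, ih]
    split_ifs <;> first | rfl | tauto

theorem pvSepB_drop_strip (cs : List Char) :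
    cs.drop (pvSepB_strip cs) = cs.dropWhile (fun c => c == ' ' || c == '\t') := by
  induction cs with
  | nil => rfl
  | cons x rest ih =>
    by_cases h : x = ' ' ∨ x = '\t'
    · simp only [pvSepB_strip, List.dropWhile]
      rcases h with h | h <;> simp [h, ih]
    · have hb : (x == ' ' || x == '\t') = false := by
        push_neg at h; simp [h.1, h.2]
      simp [pvSepB_strip, List.dropWhile, h, hb]

-- the unseen phase of A vs B's two phases, parametric in the running index i
theorem pvSepA_go_unseen (cs : List Char) : ∀ i : Int,
    (cs.drop (pvSepB_strip cs)).head? ≠ some '=' →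
    (cs.drop (pvSepB_strip cs)).head? ≠ some ':' →
    pvSepA_go cs i false = pvSepB_tail (cs.drop (pvSepB_strip cs)) (i + (pvSepB_strip cs : Int) + 1) := by
  induction cs with
  | nil => intro i _ _; rfl
  | cons x rest ih =>
    intro i hne hnc
    by_cases h2 : x = ' ' ∨ x = '\t'
    · have hstrip : pvSepB_strip (x :: rest) = pvSepB_strip rest + 1 := by
        simp [pvSepB_strip, h2]
      have hdrop : (x :: rest).drop (pvSepB_strip rest + 1) = rest.drop (pvSepB_strip rest) := rfl
      rw [hstrip, hdrop] at hne hnc ⊢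
      have h1 : ¬ (x = '=' ∨ x = ':') := by
        rintro (h | h) <;> rcases h2 with h2 | h2 <;> simp [h] at h2
      simp only [pvSepA_go, if_neg h1, if_pos h2, Bool.false_eq_true, if_false]
      rw [ih (i + 1) hne hnc]
      congr 1
      push_cast
      ring
    · have hstrip : pvSepB_strip (x :: rest) = 0 := by
        simp [pvSepB_strip, h2]
      rw [hstrip, List.drop_zero] at hne hnc ⊢
      simp only [List.head?] at hne hnc
      have h1 : ¬ (x = '=' ∨ x = ':') := by
        rintro (h | h) <;> simp [h] at hne hnc
      simp only [pvSepA_go, if_neg h1, if_neg h2, pvSepA_go_seen, pvSepB_tail, List.drop_one,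
        List.tail_cons, if_neg h1]
      congr 1
      push_cast
      ring

-- ===== VERDICT (by name: the statement is the Claim_ definition above) =====
theorem separator_index_py_spec : Claim_equal_separator_index_py := by
  intro line _ hpre
  obtain ⟨h1, h2⟩ := hpre
  rw [← pvSepB_drop_strip] at h1 h2
  unfold Spec_separator_index_py separator_index_py separator_index_py_alt
  rw [pvSepA_go_unseen line.toList 0 h1 h2]
  congr 1
  ring
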